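-- pv_equiv track=rewrite | github.com/KeumTikhon/REU | lab8/code/variant11_permutations.py | permutations_of_string
-- ===== SOURCE A (Python) =====
-- from typing import List
--
-- def permutations_of_string(s: str) -> List[str]:
--     """
--     Возвращает список всех уникальных перестановок строки s.
--     Поддерживает повторяющиеся символы (не дублирует одинаковые перестановки).
--     """
--     if s == "":
--         return [""]  # Единственная перестановка пустой строки — пустая строка
--
--     # Преобразуем в отсортированный список символов — помогает легко избегать дублей
--     chars = sorted(s)
--     n = len(chars)
--     used = [False] * n  # Массив для отслеживания использованных символов
--     current: List[str] = []  # Текущая перестановка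
--     result: List[str] = []  # Список всех перестановок
--
--     def backtrack():
--         # Если собрали длину n — сохраняем результат
--         if len(current) == n:
--             result.append("".join(current))
--             return
--         prev_char = None  # Для пропуска одинаковых символов на одной глубине
--         for i in range(n):
--             if used[i]:
--                 continue
--             # Пропуск: если текущий символ такой же, как предыдущий неподключённый, пропускаем,
--             # чтобы избежать одинаковых перестановок (классический приём).
--             if prev_char is not None and chars[i] == prev_char:
--                 continue
--             used[i] = True
--             current.append(chars[i])
--             backtrack()
--             # Откат
--             current.pop()
--             used[i] = False
--             prev_char = chars[i]  # Запоминаем предыдущий символ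
--
--     backtrack()
--     return result
-- ===== SOURCE B (Python) =====
-- from typing import List
--
-- def permutations_of_string(s: str) -> List[str]:
--     """All unique permutations of s, in sorted order: recurse on the multiset of
--     remaining characters, branching once per distinct remaining character."""
--     def perms(chars: List[str], prefix: List[str]) -> List[str]:
--         if not chars:
--             return ["".join(prefix)]
--         out: List[str] = []
--         for c in sorted(set(chars)):
--             rest = list(chars)
--             rest.remove(c)
--             out += perms(rest, prefix + [c])
--         return out
--     return perms(sorted(s), [])
-- ===== Notes on version B (the rewrite author's own statement) =====
-- stated objective: alternative
-- what changed: A backtracks over all n positions with a used[] array, a growing current list and a prev_char duplicate-skip at every level; B recurses directly on the sorted remaining multiset, branching once per distinct remaining character (sorted(set(rest))), so there is no used array, no index loop and no skip trick.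
import Mathlib
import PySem

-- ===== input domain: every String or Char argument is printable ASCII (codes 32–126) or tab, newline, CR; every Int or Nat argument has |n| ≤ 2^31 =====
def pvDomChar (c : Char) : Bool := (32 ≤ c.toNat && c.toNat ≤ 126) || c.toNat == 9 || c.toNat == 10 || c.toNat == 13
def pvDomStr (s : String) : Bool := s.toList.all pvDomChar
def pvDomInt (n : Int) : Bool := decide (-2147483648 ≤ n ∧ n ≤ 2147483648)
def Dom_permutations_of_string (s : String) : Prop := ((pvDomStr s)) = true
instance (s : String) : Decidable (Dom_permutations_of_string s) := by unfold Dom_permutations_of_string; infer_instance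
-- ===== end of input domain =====

-- B replaces A's used-array backtracking with its prev_char skip by a recursion on the
-- sorted remaining multiset that branches once per distinct remaining character (alternative).

-- ===== PORT A =====
-- A's nested `backtrack` closure: the for-loop over range(n) is pvLoopA (index i and the
-- running prev_char are its state), the recursion is pvBacktrackA; the used/current
-- mutations are passed functionally (used[i] restored after the call = the unchanged
-- `used` in the continuation). `fuel` is only a totality guard: n+1 never runs out.
mutual
def pvBacktrackA (fuel : Nat) (chars : List Char) (n : Nat)
    (used : List Bool) (current : List Char) : List String :=
  match fuel with
  | 0 => []
  | f + 1 =>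
    if current.length = n then [String.mk current]
    else pvLoopA f chars n used current none 0
termination_by fuel * (2 * n + 3)
decreasing_by
  all_goals simp_wf
  all_goals first
    | omega
    | (simp [Nat.succ_mul]; omega)

def pvLoopA (f : Nat) (chars : List Char) (n : Nat)
    (used : List Bool) (current : List Char) (prev : Option Char) (i : Nat) : List String :=
  if i < n then
    if used.getD i false then pvLoopA f chars n used current prev (i + 1)
    else if prev = some (chars.getD i 'a') then pvLoopA f chars n used current prev (i + 1)
    else
      pvBacktrackA f chars n (used.set i true) (current ++ [chars.getD i 'a'])
        ++ pvLoopA f chars n used current (some (chars.getD i 'a')) (i + 1)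
  else []
termination_by f * (2 * n + 3) + 2 * (n - i) + 1
decreasing_by
  all_goals simp_wf
  all_goals first
    | omega
    | (simp [Nat.succ_mul]; omega)
end

def permutations_of_string (s : String) : List String :=
  if s = "" then [""]
  else
    let chars := PySem.List.sorted s.toList (fun c => c)
    let n := chars.length
    pvBacktrackA (n + 1) chars n (List.replicate n false) []

-- ===== PORT B =====
-- Source B's `perms(chars, prefix)`; `rest.remove(c)` is List.erase (exact: c ∈ chars always,
-- and Python's list.remove drops the first occurrence, as List.erase does).
def pvPermsB (chars : List Char) (pre : List Char) : List String :=
  if chars = [] then [String.mk pre]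
  else
    (PySem.List.sorted (PySem.Set.ofList chars) (fun c => c)).attach.flatMap
      (fun c => pvPermsB (chars.erase c.1) (pre ++ [c.1]))
termination_by chars.length
decreasing_by
  have hm : c.1 ∈ chars :=
    (PySem.Set.mem_ofList chars c.1).1 ((PySem.List.mem_sorted _ _ _ _).1 c.2)
  rw [List.length_erase_of_mem hm]
  exact Nat.sub_lt (List.length_pos_of_mem hm) one_pos

def permutations_of_string_alt (s : String) : List String :=
  pvPermsB (PySem.List.sorted s.toList (fun c => c)) []

-- ===== PRECONDITION & SPEC =====
def Spec_permutations_of_string (s : String) (out : List String) : Prop := out = permutations_of_string_alt s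
instance (s : String) (out : List String) : Decidable (Spec_permutations_of_string s out) := by unfold Spec_permutations_of_string; infer_instance

-- ===== CLAIM (what is proved, stated in full; the proofs are below) =====
def Claim_equal_permutations_of_string : Prop := ∀ (s : String), Dom_permutations_of_string s → Spec_permutations_of_string s (permutations_of_string s)

-- ===== LEMMAS AND PROOFS =====

-- the multiset of still-unused characters, in order
def pvRem : List Char → List Bool → List Char
  | c :: cs, u :: us => if u then pvRem cs us else c :: pvRem cs us
  | _, _ => []

-- first-occurrence dedup (proof notion; bridged to sorted(set(·)) on sorted lists below)
def pvDedup : List Char → List Char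
  | [] => []
  | c :: l => c :: (pvDedup l).filter (fun x => x ≠ c)

-- the distinct characters A's loop still has to process, given prev_char
def pvDl : Option Char → List Char → List Char
  | none, l => pvDedup l
  | some p, l => (pvDedup l).filter (fun x => x ≠ p)

lemma pvRem_nil_left (us : List Bool) : pvRem [] us = [] := by cases us <;> rfl

lemma pvRem_append : ∀ (cs1 : List Char) (us1 : List Bool) (cs2 : List Char) (us2 : List Bool),
    cs1.length = us1.length →
    pvRem (cs1 ++ cs2) (us1 ++ us2) = pvRem cs1 us1 ++ pvRem cs2 us2 := by
  intro cs1
  induction cs1 with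
  | nil =>
    intro us1 cs2 us2 h
    have : us1 = [] := List.eq_nil_of_length_eq_zero (by simpa using h.symm)
    subst this; simp [pvRem_nil_left]
  | cons c cs ih =>
    intro us1 cs2 us2 h
    cases us1 with
    | nil => simp at h
    | cons u us =>
      simp only [List.cons_append, pvRem]
      rw [ih us cs2 us2 (by simpa using h)]
      cases u <;> simp

lemma pvRem_sublist : ∀ (cs : List Char) (us : List Bool), (pvRem cs us).Sublist cs := by
  intro cs
  induction cs with
  | nil => intro us; rw [pvRem_nil_left]
  | cons c cs ih =>
    intro us
    cases us with
    | nil => exact List.nil_sublist _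
    | cons u us =>
      simp only [pvRem]
      cases u with
      | false => simpa using List.Sublist.cons₂ c (ih us)
      | true => simpa using List.Sublist.cons c (ih us)

lemma pvRem_replicate_false : ∀ cs : List Char, pvRem cs (List.replicate cs.length false) = cs := by
  intro cs
  induction cs with
  | nil => rfl
  | cons c cs ih => simpa [pvRem, List.replicate] using ih

lemma pvDedup_sublist : ∀ l : List Char, (pvDedup l).Sublist l := by
  intro l
  induction l with
  | nil => simp [pvDedup]
  | cons c l ih =>
    simp only [pvDedup]
    exact List.Sublist.cons₂ c (List.filter_sublist.trans ih)

lemma pvDedup_mem {x : Char} : ∀ {l : List Char}, x ∈ pvDedup l ↔ x ∈ l := by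
  intro l
  induction l with
  | nil => simp [pvDedup]
  | cons c l ih =>
    simp only [pvDedup, List.mem_cons, List.mem_filter, ih, decide_eq_true_eq]
    by_cases hx : x = c <;> simp [hx]

lemma pvDedup_nodup : ∀ l : List Char, (pvDedup l).Nodup := by
  intro l
  induction l with
  | nil => simp [pvDedup]
  | cons c l ih =>
    simp only [pvDedup, List.nodup_cons]
    constructor
    · intro hc
      simp [List.mem_filter] at hc
    · exact ih.filter _

-- sorted(set(l)) is pvDedup l when l is already sorted
lemma pvSortedSet_eq_dedup (l : List Char) (h : l.Pairwise (· ≤ ·)) :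
    PySem.List.sorted (PySem.Set.ofList l) (fun c => c) = pvDedup l := by
  apply PySem.List.sorted_eq_of_perm_of_pairwise_lt
  · exact (List.perm_ext_iff_of_nodup (pvDedup_nodup l) (PySem.Set.nodup_ofList l)).mpr
      (fun x => pvDedup_mem.trans (PySem.Set.mem_ofList l x).symm)
  · have hle : (pvDedup l).Pairwise (· ≤ ·) := List.Pairwise.sublist (pvDedup_sublist l) h
    have hne : (pvDedup l).Pairwise (· ≠ ·) := pvDedup_nodup l
    exact (hle.and hne).imp (fun h => lt_of_le_of_ne h.1 h.2)

-- a sorted list all of whose elements are ≤ c: if c occurs, it is the last element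
lemma pvGetLast_of_mem_max : ∀ {l : List Char} {c : Char}, l.Pairwise (· ≤ ·) →
    (∀ x ∈ l, x ≤ c) → c ∈ l → l.getLast? = some c := by
  intro l
  induction l with
  | nil => intro c _ _ hm; simp at hm
  | cons a l ih =>
    intro c hs hle hm
    cases l with
    | nil =>
      simp at hm; simp [hm]
    | cons b l' =>
      have htail : c ∈ b :: l' := by
        rcases List.mem_cons.1 hm with h | h
        · -- c = a : then a ≤ b (sorted) and b ≤ c = a, so b = c
          have hab : a ≤ b := (List.pairwise_cons.1 hs).1 b (by simp)
          have hba : b ≤ c := hle b (by simp)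
          have hcb : c = b := le_antisymm (h ▸ hab) hba
          simp [hcb]
        · exact h
      rw [List.getLast?_cons_cons]
      exact ih (List.pairwise_cons.1 hs).2 (fun x hx => hle x (by simp [hx])) htail

lemma pvGetD_append_len {α : Type} : ∀ (l1 : List α) (x : α) (l2 : List α) (d : α),
    (l1 ++ x :: l2).getD l1.length d = x := by
  intro l1
  induction l1 with
  | nil => intro x l2 d; rfl
  | cons a l ih => intro x l2 d; simpa using ih x l2 d

lemma pvSet_append_len {α : Type} : ∀ (l1 : List α) (x : α) (l2 : List α) (y : α),
    (l1 ++ x :: l2).set l1.length y = l1 ++ y :: l2 := by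
  intro l1
  induction l1 with
  | nil => intro x l2 y; rfl
  | cons a l ih => intro x l2 y; simp [ih]

-- unfold pvPermsB without the attach
lemma pvPermsB_eq (chars pre : List Char) :
    pvPermsB chars pre =
      if chars = [] then [String.mk pre]
      else (PySem.List.sorted (PySem.Set.ofList chars) (fun c => c)).flatMap
             (fun c => pvPermsB (chars.erase c) (pre ++ [c])) := by
  rw [pvPermsB]
  split
  · rfl
  · rw [List.flatMap_subtype (g := fun c => pvPermsB (chars.erase c) (pre ++ [c]))
        (fun x h => rfl), List.unattach_attach]

lemma pvDl_skip (c : Char) (R : List Char) : pvDl (some c) (c :: R) = pvDl (some c) R := by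
  simp [pvDl, pvDedup, List.filter_filter]

lemma pvDl_cons_process (prev : Option Char) (c : Char) (R : List Char)
    (h : ∀ p, prev = some p → p < c) (hR : ∀ x ∈ R, c ≤ x) :
    pvDl prev (c :: R) = c :: pvDl (some c) R := by
  cases prev with
  | none => simp [pvDl, pvDedup]
  | some p =>
    have hp : p < c := h p rfl
    simp only [pvDl, pvDedup, List.filter_cons]
    rw [if_pos (by simp [ne_of_gt hp])]
    congr 1
    apply List.filter_eq_self.mpr
    intro x hx
    have hxR : x ∈ R := pvDedup_mem.1 ((List.mem_filter.1 hx).1)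
    simp only [decide_eq_true_eq]
    exact ne_of_gt (lt_of_lt_of_le hp (hR x hxR))

-- THE LOOP LEMMA: A's inner for-loop, entered at i = |cs1| with prev_char = last
-- still-unused character before i, emits one block per distinct unprocessed character.
lemma pvLoopA_eq (chars : List Char) (hs : chars.Pairwise (· ≤ ·)) (f : Nat)
    (HM : ∀ used' current', used'.length = chars.length →
          current'.length + (pvRem chars used').length = chars.length →
          (pvRem chars used').length + 1 ≤ f →
          pvBacktrackA f chars chars.length used' current' = pvPermsB (pvRem chars used') current') :
    ∀ (cs2 : List Char) (us2 : List Bool) (cs1 : List Char) (us1 : List Bool)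
      (current : List Char) (prev : Option Char),
      chars = cs1 ++ cs2 → us2.length = cs2.length → us1.length = cs1.length →
      prev = (pvRem cs1 us1).getLast? →
      current.length + (pvRem chars (us1 ++ us2)).length = chars.length →
      (pvRem chars (us1 ++ us2)).length ≤ f →
      pvLoopA f chars chars.length (us1 ++ us2) current prev cs1.length
        = (pvDl prev (pvRem cs2 us2)).flatMap
            (fun c => pvPermsB ((pvRem chars (us1 ++ us2)).erase c) (current ++ [c])) := by
  intro cs2
  induction cs2 with
  | nil =>
    intro us2 cs1 us1 current prev hchars hl2 hl1 hprev hcur hf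
    have hus2 : us2 = [] := List.eq_nil_of_length_eq_zero (by simpa using hl2)
    subst hus2
    rw [pvLoopA, if_neg (by simp [hchars])]
    cases prev <;> simp [pvDl, pvDedup, pvRem_nil_left]
  | cons c cs2' ih =>
    intro us2 cs1 us1 current prev hchars hl2 hl1 hprev hcur hf
    cases us2 with
    | nil => simp at hl2
    | cons u us2' =>
      have hl2' : us2'.length = cs2'.length := by simpa using hl2
      have hi : cs1.length < chars.length := by rw [hchars]; simp
      have hgetu : (us1 ++ u :: us2').getD cs1.length false = u := by
        rw [← hl1]; exact pvGetD_append_len us1 u us2' false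
      have hgetc : chars.getD cs1.length 'a' = c := by
        rw [hchars]; exact pvGetD_append_len cs1 c cs2' 'a'
      have hassoc : us1 ++ u :: us2' = (us1 ++ [u]) ++ us2' := by simp
      have hcassoc : chars = (cs1 ++ [c]) ++ cs2' := by rw [hchars]; simp
      have hl1' : (us1 ++ [u]).length = (cs1 ++ [c]).length := by simp [hl1]
      have hlen1 : (cs1 ++ [c]).length = cs1.length + 1 := by simp
      rw [pvLoopA, if_pos hi, hgetu, hgetc]
      cases u with
      | true =>
        rw [if_pos rfl]
        have hR : pvRem (c :: cs2') (true :: us2') = pvRem cs2' us2' := by simp [pvRem]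
        have hprev' : prev = (pvRem (cs1 ++ [c]) (us1 ++ [true])).getLast? := by
          rw [pvRem_append cs1 us1 [c] [true] hl1.symm]
          simpa [pvRem] using hprev
        have := ih us2' (cs1 ++ [c]) (us1 ++ [true]) current prev hcassoc hl2' hl1'
          hprev' (by rw [← hassoc]; exact hcur) (by rw [← hassoc]; exact hf)
        rw [hlen1] at this
        rw [← hassoc] at this
        rw [this, hR]
      | false =>
        rw [if_neg (by simp)]
        -- decompositions of the remaining multiset
        have hrem : pvRem chars (us1 ++ false :: us2')
            = pvRem cs1 us1 ++ c :: pvRem cs2' us2' := by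
          rw [hchars, pvRem_append cs1 us1 _ _ hl1.symm]; simp [pvRem]
        have hrem' : pvRem chars (us1 ++ true :: us2')
            = pvRem cs1 us1 ++ pvRem cs2' us2' := by
          rw [hchars, pvRem_append cs1 us1 _ _ hl1.symm]; simp [pvRem]
        -- order facts
        have hpairApp := (List.pairwise_append.1 (hchars ▸ hs))
        have hcs1_sorted : cs1.Pairwise (· ≤ ·) := hpairApp.1
        have hcross : ∀ a ∈ cs1, ∀ b ∈ c :: cs2', a ≤ b := hpairApp.2.2
        have hcle : ∀ x ∈ pvRem cs1 us1, x ≤ c := fun x hx =>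
          hcross x ((pvRem_sublist cs1 us1).mem hx) c (by simp)
        have hc_cs2' : ∀ x ∈ cs2', c ≤ x :=
          fun x hx => (List.pairwise_cons.1 hpairApp.2.1).1 x hx
        by_cases hpc : prev = some c
        · -- duplicate skip: chars[i] == prev_char
          rw [if_pos hpc]
          have hprev' : prev = (pvRem (cs1 ++ [c]) (us1 ++ [false])).getLast? := by
            rw [pvRem_append cs1 us1 [c] [false] hl1.symm]
            simp [pvRem, hpc]
          have := ih us2' (cs1 ++ [c]) (us1 ++ [false]) current prev hcassoc hl2' hl1'
            hprev' (by rw [← hassoc]; exact hcur) (by rw [← hassoc]; exact hf)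
          rw [hlen1] at this
          rw [← hassoc] at this
          rw [this, hpc]
          have hR : pvRem (c :: cs2') (false :: us2') = c :: pvRem cs2' us2' := by simp [pvRem]
          rw [hR, pvDl_skip]
        · -- process chars[i]
          rw [if_neg hpc]
          have hset : (us1 ++ false :: us2').set cs1.length true = us1 ++ true :: us2' := by
            rw [← hl1]; exact pvSet_append_len us1 false us2' true
          rw [hset]
          have hnotmem : c ∉ pvRem cs1 us1 := by
            intro hcmem
            exact hpc (hprev.trans (pvGetLast_of_mem_max
              (List.Pairwise.sublist (pvRem_sublist cs1 us1) hcs1_sorted) hcle hcmem))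
          have herase : (pvRem chars (us1 ++ false :: us2')).erase c
              = pvRem cs1 us1 ++ pvRem cs2' us2' := by
            rw [hrem, List.erase_append_right _ hnotmem, List.erase_cons_head]
          -- head block: the recursive backtrack call
          have hlu : (us1 ++ true :: us2').length = chars.length := by
            rw [hchars]; simp [hl1, hl2']
          have hlenrem : (pvRem chars (us1 ++ false :: us2')).length
              = (pvRem cs1 us1).length + (pvRem cs2' us2').length + 1 := by
            rw [hrem]; simp; omega
          have hlenrem' : (pvRem chars (us1 ++ true :: us2')).length
              = (pvRem cs1 us1).length + (pvRem cs2' us2').length := by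
            rw [hrem']; simp
          have hB := HM (us1 ++ true :: us2') (current ++ [c]) hlu
            (by rw [List.length_append, hlenrem']
                rw [hlenrem] at hcur
                simp only [List.length_cons, List.length_nil] at hcur ⊢
                omega)
            (by rw [hlenrem']
                rw [hlenrem] at hf
                exact hf)
          rw [hrem', ← herase] at hB
          -- tail: the loop continues with prev_char = c
          have hprev' : some c = (pvRem (cs1 ++ [c]) (us1 ++ [false])).getLast? := by
            rw [pvRem_append cs1 us1 [c] [false] hl1.symm]
            simp [pvRem]
          have hT := ih us2' (cs1 ++ [c]) (us1 ++ [false]) current (some c) hcassoc hl2' hl1'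
            hprev' (by rw [← hassoc]; exact hcur) (by rw [← hassoc]; exact hf)
          rw [hlen1] at hT
          rw [← hassoc] at hT
          rw [hT, hB]
          -- assemble the right-hand side
          have hR : pvRem (c :: cs2') (false :: us2') = c :: pvRem cs2' us2' := by simp [pvRem]
          rw [hR, pvDl_cons_process prev c (pvRem cs2' us2')
            (by intro p hp
                have hmem : p ∈ pvRem cs1 us1 :=
                  List.mem_of_getLast? (hprev.symm.trans hp)
                exact lt_of_le_of_ne (hcle p hmem) (by intro h; exact hpc (by rw [hp, h]))
            )
            (fun x hx => hc_cs2' x ((pvRem_sublist cs2' us2').mem hx))]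
          simp

-- THE MAIN LEMMA
lemma pvBacktrackA_eq (chars : List Char) (hs : chars.Pairwise (· ≤ ·)) :
    ∀ (f : Nat) (used : List Bool) (current : List Char),
      used.length = chars.length →
      current.length + (pvRem chars used).length = chars.length →
      (pvRem chars used).length + 1 ≤ f →
      pvBacktrackA f chars chars.length used current = pvPermsB (pvRem chars used) current := by
  intro f
  induction f with
  | zero => intro used current _ _ hf; omega
  | succ f ihf =>
    intro used current hlen hcur hf
    rw [pvBacktrackA]
    by_cases hc : current.length = chars.length
    · rw [if_pos hc]
      have h0 : (pvRem chars used).length = 0 := by omega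
      rw [List.eq_nil_of_length_eq_zero h0, pvPermsB_eq, if_pos rfl]
    · rw [if_neg hc]
      have hpos : pvRem chars used ≠ [] := by
        intro h; rw [h] at hcur; simp at hcur; exact hc hcur
      have hL := pvLoopA_eq chars hs f ihf chars used [] [] current none
        (by simp) hlen rfl rfl (by simpa using hcur) (by simpa using hf)
      simp only [List.nil_append, List.length_nil] at hL
      rw [hL, pvPermsB_eq, if_neg hpos,
        pvSortedSet_eq_dedup _ (List.Pairwise.sublist (pvRem_sublist chars used) hs)]
      rfl

-- ===== VERDICT (by name: the statement is the Claim_ definition above) =====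
theorem permutations_of_string_spec : Claim_equal_permutations_of_string := by
  intro s _
  unfold Spec_permutations_of_string permutations_of_string permutations_of_string_alt
  by_cases hs0 : s = ""
  · subst hs0
    rw [if_pos rfl]
    show [""] = pvPermsB (PySem.List.sorted ([] : List Char) (fun c => c)) []
    rw [show PySem.List.sorted ([] : List Char) (fun c => c) = [] from rfl, pvPermsB_eq]
    decide
  · rw [if_neg hs0]
    have hsorted : (PySem.List.sorted s.toList (fun c => c)).Pairwise (· ≤ ·) := by
      simpa using PySem.List.sorted_pairwise s.toList (fun c => c)
    have := pvBacktrackA_eq (PySem.List.sorted s.toList (fun c => c)) hsorted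
      ((PySem.List.sorted s.toList (fun c => c)).length + 1)
      (List.replicate (PySem.List.sorted s.toList (fun c => c)).length false) []
      (by simp)
      (by rw [pvRem_replicate_false]; simp)
      (by rw [pvRem_replicate_false])
    rw [pvRem_replicate_false] at this
    exact this
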